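-- pv_equiv track=rewrite | github.com/cyjzdhs/EchoWe | 打分/data_pipeline.py | extract_last_round_from_text
-- ===== SOURCE A (Python) =====
-- from typing import List, Dict, Optional, Tuple
--
-- def extract_last_round_from_text(text: str) -> Tuple[Optional[str], Optional[str]]:
--     """
--     从纯文本流中提取最后一轮用户和助手消息。
--     文本格式示例：
--         [系统提示]
--         USER: 消息1
--         ASSISTANT: 回复1
--         USER: 消息2
--         ASSISTANT: 回复2
--     返回 (user_msg, assistant_msg)，若提取失败返回 (None, None)
--     """
--     lines = text.split('\n')
--     last_user = None
--     last_assistant = None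
--     user_index = -1
--     assistant_index = -1
--
--     for i, line in enumerate(lines):
--         line = line.strip()
--         if line.startswith("USER:"):
--             last_user = line[5:].strip()
--             user_index = i
--         elif line.startswith("ASSISTANT:"):
--             last_assistant = line[10:].strip()
--             assistant_index = i
--
--     # 必须存在最后一条用户和助手，且用户出现在助手之前（或同一轮）
--     if last_user is not None and last_assistant is not None and user_index < assistant_index:
--         return last_user, last_assistant
--     return None, None
-- ===== SOURCE B (Python) =====
-- from typing import Optional, Tuple
--
-- def extract_last_round_from_text(text: str) -> Tuple[Optional[str], Optional[str]]:
--     """Backward scan with early exit: the first USER/ASSISTANT lines seen from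
--     the end are the last occurrences; stop as soon as both are found."""
--     lines = text.split('\n')
--     user = assistant = None
--     user_index = assistant_index = -1
--     for i, raw in reversed(list(enumerate(lines))):
--         line = raw.strip()
--         if line.startswith("USER:"):
--             if user is None:
--                 user = line[5:].strip()
--                 user_index = i
--         elif line.startswith("ASSISTANT:"):
--             if assistant is None:
--                 assistant = line[10:].strip()
--                 assistant_index = i
--         if user is not None and assistant is not None:
--             break
--     if user is not None and assistant is not None and user_index < assistant_index:
--         return user, assistant
--     return None, None
-- ===== Notes on version B (the rewrite author's own statement) =====
-- stated objective: alternative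
-- what changed: A folds forward over all lines keeping last-seen state; B scans the lines from the end, records the first USER/ASSISTANT lines it meets (which are the last occurrences) and breaks out early once both are found.
import Mathlib
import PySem

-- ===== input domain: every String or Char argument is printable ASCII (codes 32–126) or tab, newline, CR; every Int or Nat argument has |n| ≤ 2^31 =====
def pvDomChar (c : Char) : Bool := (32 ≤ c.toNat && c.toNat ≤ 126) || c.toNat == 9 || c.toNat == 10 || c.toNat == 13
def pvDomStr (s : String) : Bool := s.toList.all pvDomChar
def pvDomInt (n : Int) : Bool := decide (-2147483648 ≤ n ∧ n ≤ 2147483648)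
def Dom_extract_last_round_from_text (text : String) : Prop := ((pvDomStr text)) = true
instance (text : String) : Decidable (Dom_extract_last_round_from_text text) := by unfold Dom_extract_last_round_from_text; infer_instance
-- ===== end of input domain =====

-- B replaces A's forward fold over all lines by a backward scan that stops as soon as
-- both the last USER and the last ASSISTANT line have been found (objective: alternative).

-- ===== PORT A =====
def extract_last_round_from_text (text : String) : Option String × Option String :=
  let lines := (PySem.Str.split? text "\n").getD []
  let st := (PySem.List.enumerate lines).foldl
    (fun (st : Option String × Option String × Int × Int) p =>
      let line := PySem.Str.strip p.2
      if PySem.Str.startswith line "USER:" then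
        (some (PySem.Str.strip (PySem.Str.slice line (some 5) none)), st.2.1, p.1, st.2.2.2)
      else if PySem.Str.startswith line "ASSISTANT:" then
        (st.1, some (PySem.Str.strip (PySem.Str.slice line (some 10) none)), st.2.2.1, p.1)
      else st)
    (none, none, -1, -1)
  if st.1.isSome && st.2.1.isSome && decide (st.2.2.1 < st.2.2.2) then (st.1, st.2.1)
  else (none, none)

-- ===== PORT B =====
-- backward scan over the reversed enumerated lines, early break once both found
def pvScanBack : List (Int × String) → (Option String × Int) → (Option String × Int) →
    (Option String × Int) × (Option String × Int)
  | [], u, a => (u, a)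
  | (i, raw) :: rest, u, a =>
    let line := PySem.Str.strip raw
    let ua :=
      if PySem.Str.startswith line "USER:" then
        (if u.1 = none then (some (PySem.Str.strip (PySem.Str.slice line (some 5) none)), i) else u, a)
      else if PySem.Str.startswith line "ASSISTANT:" then
        (u, if a.1 = none then (some (PySem.Str.strip (PySem.Str.slice line (some 10) none)), i) else a)
      else (u, a)
    if ua.1.1.isSome && ua.2.1.isSome then ua else pvScanBack rest ua.1 ua.2

def extract_last_round_from_text_alt (text : String) : Option String × Option String :=
  let lines := (PySem.Str.split? text "\n").getD []
  let ua := pvScanBack (PySem.List.enumerate lines).reverse (none, -1) (none, -1)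
  if ua.1.1.isSome && ua.2.1.isSome && decide (ua.1.2 < ua.2.2) then (ua.1.1, ua.2.1)
  else (none, none)

-- ===== PRECONDITION & SPEC =====
def Spec_extract_last_round_from_text (text : String) (out : Option String × Option String) : Prop := out = extract_last_round_from_text_alt text
instance (text : String) (out : Option String × Option String) : Decidable (Spec_extract_last_round_from_text text out) := by unfold Spec_extract_last_round_from_text; infer_instance

-- ===== CLAIM (what is proved, stated in full; the proofs are below) =====
def Claim_equal_extract_last_round_from_text : Prop := ∀ (text : String), Dom_extract_last_round_from_text text → Spec_extract_last_round_from_text text (extract_last_round_from_text text)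

-- ===== LEMMAS AND PROOFS =====

-- first USER line (content and index) in a list of enumerated lines, default d if none; mirrors A's if/elif order
def pvFirstU (d : Option String × Int) : List (Int × String) → Option String × Int
  | [] => d
  | (i, raw) :: t =>
    let line := PySem.Str.strip raw
    if PySem.Str.startswith line "USER:" then
      (some (PySem.Str.strip (PySem.Str.slice line (some 5) none)), i)
    else pvFirstU d t

def pvFirstA (d : Option String × Int) : List (Int × String) → Option String × Int
  | [] => d
  | (i, raw) :: t =>
    let line := PySem.Str.strip raw
    if PySem.Str.startswith line "USER:" then pvFirstA d t
    else if PySem.Str.startswith line "ASSISTANT:" then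
      (some (PySem.Str.strip (PySem.Str.slice line (some 10) none)), i)
    else pvFirstA d t

-- A's forward fold computes exactly the last occurrences = first occurrences of the reversed list
lemma foldA_eq_first (es : List (Int × String)) :
    es.foldl
      (fun (st : Option String × Option String × Int × Int) p =>
        let line := PySem.Str.strip p.2
        if PySem.Str.startswith line "USER:" then
          (some (PySem.Str.strip (PySem.Str.slice line (some 5) none)), st.2.1, p.1, st.2.2.2)
        else if PySem.Str.startswith line "ASSISTANT:" then
          (st.1, some (PySem.Str.strip (PySem.Str.slice line (some 10) none)), st.2.2.1, p.1)
        else st)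
      (none, none, -1, -1)
    = ((pvFirstU (none, -1) es.reverse).1, (pvFirstA (none, -1) es.reverse).1,
       (pvFirstU (none, -1) es.reverse).2, (pvFirstA (none, -1) es.reverse).2) := by
  induction es using List.reverseRecOn with
  | nil => rfl
  | append_singleton es e ih =>
    obtain ⟨i, raw⟩ := e
    rw [List.foldl_append, ih]
    simp only [List.foldl, List.reverse_append, List.reverse_cons, List.reverse_nil,
      List.nil_append, List.cons_append, pvFirstU, pvFirstA]
    by_cases hU : PySem.Chars.startswith (PySem.Chars.strip raw.toList) ['U','S','E','R',':'] = true <;>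
      by_cases hA : PySem.Chars.startswith (PySem.Chars.strip raw.toList) ['A','S','S','I','S','T','A','N','T',':'] = true <;>
        simp [hU, hA]

-- B's backward scan with early break returns the first occurrences (unless pre-seeded)
lemma pvScanBack_eq_first (l : List (Int × String)) :
    ∀ (u a : Option String × Int),
      pvScanBack l u a
        = ((if u.1.isSome then u else pvFirstU u l),
           (if a.1.isSome then a else pvFirstA a l)) := by
  induction l with
  | nil =>
    intro u a
    cases h : u.1.isSome <;> cases h' : a.1.isSome <;> simp [pvScanBack, pvFirstU, pvFirstA]
  | cons e t ih =>
    intro u a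
    obtain ⟨i, raw⟩ := e
    rcases u with ⟨u1, ui⟩
    rcases a with ⟨a1, ai⟩
    simp only [pvScanBack, pvFirstU, pvFirstA]
    by_cases hU : PySem.Chars.startswith (PySem.Chars.strip raw.toList) ['U','S','E','R',':'] = true <;>
      by_cases hA : PySem.Chars.startswith (PySem.Chars.strip raw.toList) ['A','S','S','I','S','T','A','N','T',':'] = true <;>
        cases u1 <;> cases a1 <;>
          simp [hU, hA, ih]

-- ===== VERDICT (by name: the statement is the Claim_ definition above) =====
theorem extract_last_round_from_text_spec : Claim_equal_extract_last_round_from_text := by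
  intro text _
  unfold Spec_extract_last_round_from_text
  simp only [extract_last_round_from_text, extract_last_round_from_text_alt,
    foldA_eq_first, pvScanBack_eq_first]
  simp
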